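-- pv_equiv track=rewrite | github.com/tmu-nlp/UniTP | data/cross/mp.py | binary_layers
-- ===== SOURCE A (Python) =====
-- def binary_layers(i2w, i2t, i2l, batch_segment, segment, token, tag, label, xtype, joint):
--     layers_of_label = []
--     layers_of_xtype = []
--     layers_of_joint = []
--     jnt_start = rgt_start = 0
--     for s_size, s_len in zip(batch_segment, segment):
--         label_layer = tuple(i2l[i] for i in label[rgt_start + 1: rgt_start + s_len + 1])
--         layers_of_label.append(label_layer)
--         layers_of_joint.append({i for i, j in enumerate(joint[jnt_start: jnt_start + s_len]) if i and j})
--         layers_of_xtype.append(xtype[rgt_start + 1: rgt_start + s_len + 1])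
--         rgt_start += s_size
--         jnt_start += s_size - 1
--         if s_len == 1:
--             break
--     bottom_end = segment[0] + 1
--     tags  = tuple(i2t[i] for i in   tag[1:bottom_end])
--     words = tuple(i2w[i] for i in token[1:bottom_end])
--     return words, tags, layers_of_label, layers_of_xtype, layers_of_joint
-- ===== SOURCE B (Python) =====
-- def binary_layers(i2w, i2t, i2l, batch_segment, segment, token, tag, label, xtype, joint):
--     pairs = list(zip(batch_segment, segment))
--     # number of layers: first s_len == 1 (inclusive), else all pairs
--     cut = next((k + 1 for k, (_, sl) in enumerate(pairs) if sl == 1), len(pairs))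
--     head = pairs[:cut]
--     # prefix-sum offset tables
--     rgt = [0]
--     jnt = [0]
--     for s_size, _ in head:
--         rgt.append(rgt[-1] + s_size)
--         jnt.append(jnt[-1] + s_size - 1)
--     layers_of_label = [tuple(i2l[i] for i in label[r + 1: r + sl + 1])
--                        for r, (_, sl) in zip(rgt, head)]
--     layers_of_xtype = [xtype[r + 1: r + sl + 1] for r, (_, sl) in zip(rgt, head)]
--     layers_of_joint = [{i for i, j in enumerate(joint[g: g + sl]) if i and j}
--                        for g, (_, sl) in zip(jnt, head)]
--     bottom_end = segment[0] + 1
--     tags = tuple(i2t[i] for i in tag[1:bottom_end])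
--     words = tuple(i2w[i] for i in token[1:bottom_end])
--     return words, tags, layers_of_label, layers_of_xtype, layers_of_joint
-- ===== Notes on version B (the rewrite author's own statement) =====
-- stated objective: alternative
-- what changed: A's single stateful loop with running offsets, in-place appends and an early break is replaced by first computing the layer cutoff (first s_len==1, inclusive), building rgt/jnt offset tables as prefix sums, and then producing the label/xtype/joint layers with three independent comprehensions over the zipped offset tables.
import Mathlib
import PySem

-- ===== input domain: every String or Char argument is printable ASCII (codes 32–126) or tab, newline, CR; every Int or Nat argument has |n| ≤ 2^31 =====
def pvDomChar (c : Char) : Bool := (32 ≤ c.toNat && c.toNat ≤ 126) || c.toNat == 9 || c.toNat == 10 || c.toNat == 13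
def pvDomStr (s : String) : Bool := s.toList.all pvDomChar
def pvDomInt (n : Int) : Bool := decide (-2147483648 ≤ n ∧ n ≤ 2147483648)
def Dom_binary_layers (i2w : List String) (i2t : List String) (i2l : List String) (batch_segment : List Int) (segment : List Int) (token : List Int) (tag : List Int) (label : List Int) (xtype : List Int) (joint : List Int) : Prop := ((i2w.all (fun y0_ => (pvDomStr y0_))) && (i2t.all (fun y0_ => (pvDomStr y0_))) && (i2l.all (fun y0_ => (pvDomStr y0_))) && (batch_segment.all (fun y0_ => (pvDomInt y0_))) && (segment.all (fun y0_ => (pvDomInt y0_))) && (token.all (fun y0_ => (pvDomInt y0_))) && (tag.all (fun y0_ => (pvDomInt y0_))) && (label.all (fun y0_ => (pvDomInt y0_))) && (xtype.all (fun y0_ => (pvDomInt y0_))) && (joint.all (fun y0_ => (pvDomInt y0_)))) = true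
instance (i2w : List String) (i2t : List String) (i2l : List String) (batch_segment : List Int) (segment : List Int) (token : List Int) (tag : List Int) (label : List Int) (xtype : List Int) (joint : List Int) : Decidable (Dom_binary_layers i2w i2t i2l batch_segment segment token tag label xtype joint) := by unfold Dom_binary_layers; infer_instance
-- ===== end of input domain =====

-- B replaces A's stateful offset-accumulating loop with an explicit layer cutoff, prefix-sum
-- offset tables and three independent comprehensions (objective: alternative decomposition,
-- same cost; equal return value on Pre_).


-- ===== PORT A =====
-- A's for-loop over zip(batch_segment, segment) with running offsets rgt_start/jnt_start and
-- an early break on s_len == 1; i2l[i] is ported as pyGet? with a default that Pre_ makes unreachable.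
def binaryLoopA (i2l : List String) (label : List Int) (xtype : List Int) (joint : List Int) :
    List (Int × Int) → Int → Int → List (List String) × List (List Int) × List (List Int)
  | [], _, _ => ([], [], [])
  | (s_size, s_len) :: rest, rgt_start, jnt_start =>
    let label_layer := (PySem.List.slice label (some (rgt_start + 1)) (some (rgt_start + s_len + 1))).map
        (fun i => (PySem.List.pyGet? i2l i).getD "")
    let joint_layer : PySem.Set Int := PySem.Set.ofList
        (((PySem.List.enumerate (PySem.List.slice joint (some jnt_start) (some (jnt_start + s_len))) 0).filter
            (fun p => p.1 != 0 && p.2 != 0)).map (fun p => p.1))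
    let xtype_layer := PySem.List.slice xtype (some (rgt_start + 1)) (some (rgt_start + s_len + 1))
    let tail := if s_len == 1 then ([], [], [])
      else binaryLoopA i2l label xtype joint rest (rgt_start + s_size) (jnt_start + s_size - 1)
    (label_layer :: tail.1, xtype_layer :: tail.2.1, joint_layer :: tail.2.2)

def binary_layers (i2w : List String) (i2t : List String) (i2l : List String) (batch_segment : List Int) (segment : List Int) (token : List Int) (tag : List Int) (label : List Int) (xtype : List Int) (joint : List Int) : List String × List String × List (List String) × List (List Int) × List (List Int) :=
  let res := binaryLoopA i2l label xtype joint (batch_segment.zip segment) 0 0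
  let bottom_end := (PySem.List.pyGet? segment 0).getD 0 + 1
  let tags := (PySem.List.slice tag (some 1) (some bottom_end)).map (fun i => (PySem.List.pyGet? i2t i).getD "")
  let words := (PySem.List.slice token (some 1) (some bottom_end)).map (fun i => (PySem.List.pyGet? i2w i).getD "")
  (words, tags, res.1, res.2.1, res.2.2)

-- ===== PORT B =====
-- number of layers: first s_len == 1 (inclusive), else all pairs
def cutB (pairs : List (Int × Int)) : Nat :=
  match pairs.findIdx? (fun p => p.2 == 1) with
  | some k => k + 1
  | none => pairs.length

def binary_layers_alt (i2w : List String) (i2t : List String) (i2l : List String) (batch_segment : List Int) (segment : List Int) (token : List Int) (tag : List Int) (label : List Int) (xtype : List Int) (joint : List Int) : List String × List String × List (List String) × List (List Int) × List (List Int) :=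
  let pairs := batch_segment.zip segment
  let head := pairs.take (cutB pairs)
  -- prefix-sum offset tables (Source B's rgt / jnt lists)
  let rgt := head.scanl (fun a p => a + p.1) 0
  let jnt := head.scanl (fun a p => a + p.1 - 1) 0
  let layers_of_label := (rgt.zip head).map (fun q =>
    (PySem.List.slice label (some (q.1 + 1)) (some (q.1 + q.2.2 + 1))).map
      (fun i => (PySem.List.pyGet? i2l i).getD ""))
  let layers_of_xtype := (rgt.zip head).map (fun q =>
    PySem.List.slice xtype (some (q.1 + 1)) (some (q.1 + q.2.2 + 1)))
  let layers_of_joint := (jnt.zip head).map (fun q =>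
    (PySem.Set.ofList
      (((PySem.List.enumerate (PySem.List.slice joint (some q.1) (some (q.1 + q.2.2))) 0).filter
          (fun p => p.1 != 0 && p.2 != 0)).map (fun p => p.1)) : PySem.Set Int))
  let bottom_end := (PySem.List.pyGet? segment 0).getD 0 + 1
  let tags := (PySem.List.slice tag (some 1) (some bottom_end)).map (fun i => (PySem.List.pyGet? i2t i).getD "")
  let words := (PySem.List.slice token (some 1) (some bottom_end)).map (fun i => (PySem.List.pyGet? i2w i).getD "")
  (words, tags, layers_of_label, layers_of_xtype, layers_of_joint)

-- ===== PRECONDITION & SPEC =====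
-- Pre_ is exactly the inputs on which Python A returns: segment nonempty (else segment[0] raises
-- IndexError) and every vocabulary index A dereferences is a valid Python index (i2l inside the
-- layer windows given by the batch_segment prefix sums up to the first s_len == 1 layer, i2t/i2w
-- inside tag[1:segment[0]+1] / token[1:segment[0]+1]); outside, A raises IndexError.
def Pre_binary_layers (i2w : List String) (i2t : List String) (i2l : List String) (batch_segment : List Int) (segment : List Int) (token : List Int) (tag : List Int) (label : List Int) (xtype : List Int) (joint : List Int) : Prop :=
  let pairs := batch_segment.zip segment
  let head := pairs.take ((((pairs.findIdx? (fun p => p.2 == 1)).map (· + 1)).getD pairs.length))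
  segment ≠ [] ∧
  (∀ q ∈ (head.scanl (fun a p => a + p.1) 0).zip head,
      ∀ i ∈ PySem.List.slice label (some (q.1 + 1)) (some (q.1 + q.2.2 + 1)), PySem.Raise.InRange i2l.length i) ∧
  (∀ i ∈ PySem.List.slice tag (some 1) (some (segment.headD 0 + 1)), PySem.Raise.InRange i2t.length i) ∧
  (∀ i ∈ PySem.List.slice token (some 1) (some (segment.headD 0 + 1)), PySem.Raise.InRange i2w.length i)
instance (i2w : List String) (i2t : List String) (i2l : List String) (batch_segment : List Int) (segment : List Int) (token : List Int) (tag : List Int) (label : List Int) (xtype : List Int) (joint : List Int) : Decidable (Pre_binary_layers i2w i2t i2l batch_segment segment token tag label xtype joint) := by unfold Pre_binary_layers; infer_instance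

def pvWitness_binary_layers : List String × List String × List String × List Int × List Int × List Int × List Int × List Int × List Int × List Int :=
  (["w"], ["t"], ["L"], [1], [1], [0, 0], [0, 0], [0, 0], [0, 0], [0, 0])

def Spec_binary_layers (i2w : List String) (i2t : List String) (i2l : List String) (batch_segment : List Int) (segment : List Int) (token : List Int) (tag : List Int) (label : List Int) (xtype : List Int) (joint : List Int) (out : List String × List String × List (List String) × List (List Int) × List (List Int)) : Prop := out = binary_layers_alt i2w i2t i2l batch_segment segment token tag label xtype joint
instance (i2w : List String) (i2t : List String) (i2l : List String) (batch_segment : List Int) (segment : List Int) (token : List Int) (tag : List Int) (label : List Int) (xtype : List Int) (joint : List Int) (out : List String × List String × List (List String) × List (List Int) × List (List Int)) : Decidable (Spec_binary_layers i2w i2t i2l batch_segment segment token tag label xtype joint out) := by unfold Spec_binary_layers; infer_instance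

-- ===== CLAIM (what is proved, stated in full; the proofs are below) =====
def Claim_equal_binary_layers : Prop := ∀ (i2w : List String) (i2t : List String) (i2l : List String) (batch_segment : List Int) (segment : List Int) (token : List Int) (tag : List Int) (label : List Int) (xtype : List Int) (joint : List Int), Dom_binary_layers i2w i2t i2l batch_segment segment token tag label xtype joint → Pre_binary_layers i2w i2t i2l batch_segment segment token tag label xtype joint → Spec_binary_layers i2w i2t i2l batch_segment segment token tag label xtype joint (binary_layers i2w i2t i2l batch_segment segment token tag label xtype joint)

-- ===== LEMMAS AND PROOFS =====

lemma cutB_nil : cutB [] = 0 := rfl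

lemma cutB_cons_one (ss : Int) (rest : List (Int × Int)) : cutB ((ss, 1) :: rest) = 1 := by
  simp [cutB, List.findIdx?_cons]

lemma cutB_cons_ne (ss sl : Int) (rest : List (Int × Int)) (h : sl ≠ 1) :
    cutB ((ss, sl) :: rest) = cutB rest + 1 := by
  simp only [cutB, List.findIdx?_cons]
  have : ((ss, sl).2 == (1 : Int)) = false := by simpa using h
  simp only [this, Bool.false_eq_true, if_false]
  cases hf : (rest.findIdx? (fun p => p.2 == 1)) <;> simp [hf]

lemma loop_eq (i2l : List String) (label xtype joint : List Int) :
    ∀ (pairs : List (Int × Int)) (r j : Int),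
      binaryLoopA i2l label xtype joint pairs r j =
      ( (((pairs.take (cutB pairs)).scanl (fun a p => a + p.1) r).zip (pairs.take (cutB pairs))).map (fun q =>
          (PySem.List.slice label (some (q.1 + 1)) (some (q.1 + q.2.2 + 1))).map
            (fun i => (PySem.List.pyGet? i2l i).getD "")),
        (((pairs.take (cutB pairs)).scanl (fun a p => a + p.1) r).zip (pairs.take (cutB pairs))).map (fun q =>
          PySem.List.slice xtype (some (q.1 + 1)) (some (q.1 + q.2.2 + 1))),
        (((pairs.take (cutB pairs)).scanl (fun a p => a + p.1 - 1) j).zip (pairs.take (cutB pairs))).map (fun q =>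
          (PySem.Set.ofList
            (((PySem.List.enumerate (PySem.List.slice joint (some q.1) (some (q.1 + q.2.2))) 0).filter
                (fun p => p.1 != 0 && p.2 != 0)).map (fun p => p.1)) : PySem.Set Int)) ) := by
  intro pairs
  induction pairs with
  | nil => intro r j; simp [binaryLoopA, cutB_nil]
  | cons hd rest ih =>
    intro r j
    obtain ⟨ss, sl⟩ := hd
    by_cases h : sl = 1
    · subst h
      simp [binaryLoopA, cutB_cons_one]
    · have hcut := cutB_cons_ne ss sl rest h
      have hne : (sl == (1 : Int)) = false := by simpa using h
      simp only [binaryLoopA, hne, Bool.false_eq_true, if_false, hcut,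
        List.take_succ_cons, List.scanl_cons, List.zip_cons_cons, List.map_cons]
      rw [ih]

lemma ports_eq (i2w : List String) (i2t : List String) (i2l : List String) (batch_segment : List Int) (segment : List Int) (token : List Int) (tag : List Int) (label : List Int) (xtype : List Int) (joint : List Int) :
    binary_layers i2w i2t i2l batch_segment segment token tag label xtype joint =
    binary_layers_alt i2w i2t i2l batch_segment segment token tag label xtype joint := by
  simp only [binary_layers, binary_layers_alt, loop_eq]

-- ===== VERDICT (by name: the statement is the Claim_ definition above) =====
theorem binary_layers_spec : Claim_equal_binary_layers := by
  intro i2w i2t i2l bs seg tok tg lb xt jo _ _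
  unfold Spec_binary_layers
  exact ports_eq i2w i2t i2l bs seg tok tg lb xt jo
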